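-- pv_equiv track=rewrite | github.com/BeginnerLoc/DSA-assignment1 | Question2c.py | three_way_split
-- ===== SOURCE A (Python) =====
-- def three_way_split(arr,l,r):
--
--     if l>=r:
--         # Base case: single element or empty array
--         return [arr[l]] if l == r else []
--
--     # Split the array into three sub arrays with approximately size n/2
--     n = r - l + 1
--     mid1 = l + n // 4
--     mid2 = l + n // 2
--
--     # Recursive sorting
--     left_subarr = three_way_split(arr, l, mid2 - 1)
--     middle_subarr = three_way_split(arr, mid1, mid1 + n//2 - 1)
--     right_subarr = three_way_split(arr, mid2, r)
--
--     # Merge the sorted arrays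
--     return merge_sort(left_subarr, middle_subarr, right_subarr)
--
-- def merge_sort(left_subarr, middle_subarr, right_subarr):  # Merge three sorted arrays
--     merged = []
--     i = j = k = 0
--
--     # Merge elements from the three subarrays
--     while i < len(left_subarr) or j < len(middle_subarr) or k < len(right_subarr):
--         # Initialize variables to hold the current elements for comparison for each subarrays
--         current_left = left_subarr[i] if i < len(left_subarr) else None
--         current_middle = middle_subarr[j] if j < len(middle_subarr) else None
--         current_right = right_subarr[k] if k < len(right_subarr) else None
--
--         # Compare current elements and append the smallest to the merged array
--         # Check if the element in the left array is the smallest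
--         if current_left is not None and (current_middle is None or current_left <= current_middle
--             ) and (current_right is None or current_left <= current_right):
--             if not merged or current_left != merged[-1]:
--                 merged.append(current_left)
--             i += 1
--         # Check if the element in the middle array is the smallest
--         elif current_middle is not None and (current_right is None or current_middle <= current_right):
--             if not merged or current_middle != merged[-1]:
--                 merged.append(current_middle)
--             j += 1
--         else: # The element in the right array is the smallest
--             if not merged or current_right != merged[-1]:
--                 merged.append(current_right)
--             k += 1
--
--     return merged
-- ===== SOURCE B (Python) =====
-- def three_way_split(arr, l, r):
--     # Sort the slice once and drop adjacent duplicates in one linear pass,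
--     # instead of the overlapping three-way recursive split with a three-way merge.
--     if r < l:
--         return []
--     out = []
--     for x in sorted(arr[l:r+1]):
--         if not out or x != out[-1]:
--             out.append(x)
--     return out
-- ===== Notes on version B (the rewrite author's own statement) =====
-- stated objective: simpler
-- what changed: Replaces the overlapping three-way recursive split with a redundant middle subarray and a hand-written three-way deduplicating merge by a single sort of the slice followed by one linear adjacent-dedup pass.
-- outside the precondition, e.g. on three_way_split([1, 2, 3], -1, -1): A returns [3], B returns []
import Mathlib
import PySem

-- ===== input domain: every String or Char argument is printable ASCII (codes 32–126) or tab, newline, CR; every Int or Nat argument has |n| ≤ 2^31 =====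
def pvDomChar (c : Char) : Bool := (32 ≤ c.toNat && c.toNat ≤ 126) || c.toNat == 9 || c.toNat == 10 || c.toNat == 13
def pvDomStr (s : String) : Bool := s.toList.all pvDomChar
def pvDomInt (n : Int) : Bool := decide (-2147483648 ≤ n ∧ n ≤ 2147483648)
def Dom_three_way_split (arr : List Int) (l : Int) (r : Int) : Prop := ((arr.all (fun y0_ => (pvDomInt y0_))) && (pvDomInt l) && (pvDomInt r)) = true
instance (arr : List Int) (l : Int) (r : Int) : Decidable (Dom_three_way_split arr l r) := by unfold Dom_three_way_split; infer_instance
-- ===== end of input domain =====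

-- B replaces A's overlapping three-way recursive split + three-way dedup merge by
-- one sort of the slice followed by a single adjacent-dedup pass (simpler, one pass).


-- ===== PORT A =====
-- n // 2 and n // 4 (positive divisor: Python floor division agrees with Int.ediv)
lemma pyFloorDiv2 (a : Int) : PySem.Int.floordiv a 2 = a / 2 :=
  PySem.Int.floordiv_eq_ediv_of_pos (by norm_num)
lemma pyFloorDiv4 (a : Int) : PySem.Int.floordiv a 4 = a / 4 :=
  PySem.Int.floordiv_eq_ediv_of_pos (by norm_num)

-- Python's `if not merged or cur != merged[-1]: merged.append(cur)`
def pushDedup (merged : List Int) (x : Int) : List Int :=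
  if merged = [] ∨ merged.getLast? ≠ some x then merged ++ [x] else merged

-- the three-index while loop of merge_sort; the indices i, j, k into the fixed lists are
-- carried as the remaining suffixes L, M, R (current element = head, exhausted = [])
def pyMerge3 (merged L M R : List Int) : List Int :=
  if _hstop : L = [] ∧ M = [] ∧ R = [] then merged
  else if _h1 : L ≠ [] ∧ (M.head? = none ∨ L.headD 0 ≤ M.head?.getD 0) ∧ (R.head? = none ∨ L.headD 0 ≤ R.head?.getD 0) then
    pyMerge3 (pushDedup merged (L.headD 0)) L.tail M R
  else if _h2 : M ≠ [] ∧ (R.head? = none ∨ M.headD 0 ≤ R.head?.getD 0) then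
    pyMerge3 (pushDedup merged (M.headD 0)) L M.tail R
  else
    pyMerge3 (pushDedup merged (R.headD 0)) L M R.tail
termination_by L.length + M.length + R.length
decreasing_by
  · have : L ≠ [] := _h1.1
    cases L with | nil => simp at this | cons a L' => simp
  · have : M ≠ [] := _h2.1
    cases M with | nil => simp at this | cons a M' => simp
  · have hR : R ≠ [] := by
      intro hRe
      subst hRe
      have hM : M = [] := by
        by_contra hMne
        exact _h2 ⟨hMne, Or.inl rfl⟩
      have hL : L = [] := by
        by_contra hLne
        exact _h1 ⟨hLne, by simp [hM], Or.inl rfl⟩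
      exact _hstop ⟨hL, hM, rfl⟩
    cases R with | nil => simp at hR | cons a R' => simp

def merge_sort (left_subarr middle_subarr right_subarr : List Int) : List Int :=
  pyMerge3 [] left_subarr middle_subarr right_subarr

def three_way_split (arr : List Int) (l : Int) (r : Int) : List Int :=
  if _hlr : l ≥ r then
    -- arr[l] raises IndexError out of range: those inputs are outside Pre_ (getD 0 unreachable there)
    if l = r then [(PySem.List.pyGet? arr l).getD 0] else []
  else
    let n := r - l + 1
    let mid1 := l + PySem.Int.floordiv n 4
    let mid2 := l + PySem.Int.floordiv n 2
    merge_sort (three_way_split arr l (mid2 - 1))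
      (three_way_split arr mid1 (mid1 + PySem.Int.floordiv n 2 - 1))
      (three_way_split arr mid2 r)
termination_by (r - l).toNat
decreasing_by
  all_goals
    simp only [pyFloorDiv2, pyFloorDiv4]
    omega

-- ===== PORT B =====
-- `for x in s: if not out or x != out[-1]: out.append(x)`
def dedupAdj (out : List Int) (s : List Int) : List Int :=
  match s with
  | [] => out
  | x :: t => if out = [] ∨ out.getLast? ≠ some x then dedupAdj (out ++ [x]) t else dedupAdj out t

def three_way_split_alt (arr : List Int) (l : Int) (r : Int) : List Int :=
  if r < l then []
  else dedupAdj [] (PySem.List.sorted (PySem.List.slice arr (some l) (some (r + 1))) (fun x => x) false)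

-- ===== PRECONDITION & SPEC =====
-- Pre_ restricts to the function's natural domain: a valid subrange 0 ≤ l ≤ r < len(arr),
-- or the empty range r < l (on which A returns [] without touching arr). It excludes
-- calls with a negative or out-of-range index and l ≤ r, which lie outside the natural
-- domain of a subrange routine (A there either raises IndexError or indexes via Python's
-- negative-index wraparound).
def Pre_three_way_split (arr : List Int) (l : Int) (r : Int) : Prop :=
  r < l ∨ (0 ≤ l ∧ l ≤ r ∧ r < arr.length)

instance (arr : List Int) (l : Int) (r : Int) : Decidable (Pre_three_way_split arr l r) := by
  unfold Pre_three_way_split; infer_instance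

def pvWitness_three_way_split : List Int × Int × Int := ([3, 1, 2, 1], 1, 3)

def Spec_three_way_split (arr : List Int) (l : Int) (r : Int) (out : List Int) : Prop := out = three_way_split_alt arr l r
instance (arr : List Int) (l : Int) (r : Int) (out : List Int) : Decidable (Spec_three_way_split arr l r out) := by unfold Spec_three_way_split; infer_instance

-- ===== CLAIM (what is proved, stated in full; the proofs are below) =====
def Claim_equal_three_way_split : Prop := ∀ (arr : List Int) (l : Int) (r : Int), Dom_three_way_split arr l r → Pre_three_way_split arr l r → Spec_three_way_split arr l r (three_way_split arr l r)

-- ===== LEMMAS AND PROOFS =====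

-- `(o is None or x <= o)`, the merge's comparison against a possibly exhausted subarray
def leOpt (x : Int) (o : Option Int) : Prop := o = none ∨ x ≤ o.getD 0

-- two strictly increasing lists with the same members are equal
lemma strictSorted_ext (L M : List Int) (hL : L.Pairwise (· < ·)) (hM : M.Pairwise (· < ·))
    (h : ∀ x, x ∈ L ↔ x ∈ M) : L = M := by
  have hp : L.Perm M :=
    (List.perm_ext_iff_of_nodup (hL.imp ne_of_lt) (hM.imp ne_of_lt)).mpr h
  exact hp.eq_of_pairwise (fun a b _ _ h1 h2 => absurd h1 (lt_asymm h2)) hL hM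

lemma mem_pushDedup (merged : List Int) (x y : Int) :
    y ∈ pushDedup merged x ↔ y ∈ merged ∨ y = x := by
  unfold pushDedup
  split_ifs with h
  · simp
  · rcases not_or.mp h with ⟨hne, hlast⟩
    have hlast' := not_not.mp hlast
    constructor
    · intro hy; exact Or.inl hy
    · rintro (hy | rfl)
      · exact hy
      · exact List.mem_of_getLast? hlast'

lemma le_of_mem_pairwise_lt_getLast {merged : List Int} {a b : Int}
    (hm : merged.Pairwise (· < ·)) (ha : a ∈ merged) (hb : merged.getLast? = some b) : a ≤ b := by
  induction merged with
  | nil => simp at ha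
  | cons c t ih =>
    cases t with
    | nil =>
      simp at ha hb; omega
    | cons d t' =>
      simp only [List.getLast?_cons_cons] at hb
      rcases List.mem_cons.mp ha with rfl | ha'
      · have hbm : b ∈ d :: t' := List.mem_of_getLast? hb
        have := (List.pairwise_cons.mp hm).1 b hbm
        omega
      · exact ih (List.pairwise_cons.mp hm).2 ha' hb

lemma pushDedup_pairwise {merged : List Int} {x : Int}
    (hm : merged.Pairwise (· < ·)) (hle : ∀ a ∈ merged, a ≤ x) :
    (pushDedup merged x).Pairwise (· < ·) := by
  unfold pushDedup
  split_ifs with h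
  · cases merged with
    | nil => simp
    | cons u t =>
      rcases h with h0 | hlast
      · simp at h0
      · refine List.pairwise_append.mpr ⟨hm, by simp, ?_⟩
        intro a ha b hb
        simp only [List.mem_singleton] at hb; subst hb
        obtain ⟨c, hc⟩ : ∃ c, (u :: t).getLast? = some c :=
          ⟨_, List.getLast?_eq_some_getLast (by simp)⟩
        have hac := le_of_mem_pairwise_lt_getLast hm ha hc
        have hcb : c ≤ b := hle c (List.mem_of_getLast? hc)
        have hne : c ≠ b := fun he => hlast (he ▸ hc)
        omega
  · exact hm

lemma head_le_all {M : List Int} {x : Int}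
    (hM : M.Pairwise (· < ·)) (h : leOpt x M.head?) : ∀ y ∈ M, x ≤ y := by
  intro y hy
  cases M with
  | nil => simp at hy
  | cons m t =>
    simp [leOpt] at h
    rcases List.mem_cons.mp hy with rfl | hy'
    · exact h
    · have := (List.pairwise_cons.mp hM).1 y hy'
      omega

set_option maxHeartbeats 4000000 in
lemma pyMerge3_spec (merged L M R : List Int) :
    merged.Pairwise (· < ·) → L.Pairwise (· < ·) → M.Pairwise (· < ·) → R.Pairwise (· < ·) →
    (∀ a ∈ merged, ∀ x, (x ∈ L ∨ x ∈ M ∨ x ∈ R) → a ≤ x) →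
    (pyMerge3 merged L M R).Pairwise (· < ·) ∧
      (∀ x, x ∈ pyMerge3 merged L M R ↔ x ∈ merged ∨ x ∈ L ∨ x ∈ M ∨ x ∈ R) := by
  induction merged, L, M, R using pyMerge3.induct with
  | case1 merged L M R hstop =>
    intro hm _ _ _ _
    rcases hstop with ⟨rfl, rfl, rfl⟩
    rw [pyMerge3]
    simp [hm]
  | case2 merged L M R hstop h1 ih =>
    intro hm hL hM hR hle
    obtain ⟨hLne, hLM, hLR⟩ := h1
    cases L with
    | nil => exact absurd rfl hLne
    | cons a L' =>
      simp only [List.headD_cons] at hLM hLR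
      simp only [List.headD_cons, List.tail_cons] at ih
      rw [pyMerge3, dif_neg hstop, dif_pos ⟨hLne, by simpa using hLM, by simpa using hLR⟩]
      simp only [List.headD_cons, List.tail_cons]
      have hLtail := (List.pairwise_cons.mp hL).2
      have hhead : ∀ x, (x ∈ L' ∨ x ∈ M ∨ x ∈ R) → a ≤ x := by
        rintro x (hx | hx | hx)
        · exact le_of_lt ((List.pairwise_cons.mp hL).1 x hx)
        · exact head_le_all hM hLM x hx
        · exact head_le_all hR hLR x hx
      have hle' : ∀ b ∈ pushDedup merged a, ∀ x, (x ∈ L' ∨ x ∈ M ∨ x ∈ R) → b ≤ x := by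
        intro b hb x hx
        rcases (mem_pushDedup merged a b).mp hb with hb' | rfl
        · refine hle b hb' x ?_
          rcases hx with h | h | h
          · exact Or.inl (List.mem_cons_of_mem _ h)
          · exact Or.inr (Or.inl h)
          · exact Or.inr (Or.inr h)
        · exact hhead x hx
      have hm' := pushDedup_pairwise hm (fun b hb => hle b hb a (Or.inl List.mem_cons_self))
      have ih' := ih hm' hLtail hM hR hle'
      refine ⟨ih'.1, fun x => ?_⟩
      rw [ih'.2 x, mem_pushDedup]
      simp only [List.mem_cons]
      tauto
  | case3 merged L M R hstop h1 h2 ih =>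
    intro hm hL hM hR hle
    obtain ⟨hMne, hMR⟩ := h2
    cases M with
    | nil => exact absurd rfl hMne
    | cons m0 M' =>
      simp only [List.headD_cons] at hMR
      simp only [List.headD_cons, List.tail_cons] at ih
      rw [pyMerge3, dif_neg hstop, dif_neg h1, dif_pos ⟨hMne, by simpa using hMR⟩]
      simp only [List.headD_cons, List.tail_cons]
      have hMtail := (List.pairwise_cons.mp hM).2
      have hm0L : ∀ x ∈ L, m0 ≤ x := by
        cases L with
        | nil => intro x hx; simp at hx
        | cons a L' =>
          have hcase : ¬(leOpt a (m0 :: M').head? ∧ leOpt a R.head?) := by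
            intro hc
            exact h1 ⟨by simp, by simpa [leOpt] using hc.1, by simpa [leOpt] using hc.2⟩
          have ha : m0 ≤ a := by
            by_cases hra : leOpt a R.head?
            · have hnm : ¬ leOpt a (m0 :: M').head? := fun hc => hcase ⟨hc, hra⟩
              simp [leOpt] at hnm
              omega
            · cases R with
              | nil => exact absurd (Or.inl rfl) hra
              | cons r0 R' =>
                simp [leOpt] at hra hMR
                omega
          intro x hx
          rcases List.mem_cons.mp hx with rfl | hx'
          · exact ha
          · exact le_trans ha (le_of_lt ((List.pairwise_cons.mp hL).1 x hx'))
      have hhead : ∀ x, (x ∈ L ∨ x ∈ M' ∨ x ∈ R) → m0 ≤ x := by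
        rintro x (hx | hx | hx)
        · exact hm0L x hx
        · exact le_of_lt ((List.pairwise_cons.mp hM).1 x hx)
        · exact head_le_all hR hMR x hx
      have hle' : ∀ b ∈ pushDedup merged m0, ∀ x, (x ∈ L ∨ x ∈ M' ∨ x ∈ R) → b ≤ x := by
        intro b hb x hx
        rcases (mem_pushDedup merged m0 b).mp hb with hb' | rfl
        · refine hle b hb' x ?_
          rcases hx with h | h | h
          · exact Or.inl h
          · exact Or.inr (Or.inl (List.mem_cons_of_mem _ h))
          · exact Or.inr (Or.inr h)
        · exact hhead x hx
      have hm' := pushDedup_pairwise hm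
        (fun b hb => hle b hb m0 (Or.inr (Or.inl List.mem_cons_self)))
      have ih' := ih hm' hL hMtail hR hle'
      refine ⟨ih'.1, fun x => ?_⟩
      rw [ih'.2 x, mem_pushDedup]
      simp only [List.mem_cons]
      tauto
  | case4 merged L M R hstop h1 h2 ih =>
    intro hm hL hM hR hle
    have hRne : R ≠ [] := by
      intro hRe
      subst hRe
      have hMe : M = [] := by
        by_contra hMne
        exact h2 ⟨hMne, Or.inl rfl⟩
      have hLe : L = [] := by
        by_contra hLne
        exact h1 ⟨hLne, by simp [hMe], Or.inl rfl⟩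
      exact hstop ⟨hLe, hMe, rfl⟩
    cases R with
    | nil => exact absurd rfl hRne
    | cons r0 R' =>
      simp only [List.headD_cons, List.tail_cons] at ih
      rw [pyMerge3, dif_neg hstop, dif_neg h1, dif_neg h2]
      simp only [List.headD_cons, List.tail_cons]
      have hRtail := (List.pairwise_cons.mp hR).2
      have hr0M : ∀ x ∈ M, r0 ≤ x := by
        cases M with
        | nil => intro x hx; simp at hx
        | cons m0 M' =>
          have hnm : ¬ leOpt m0 (r0 :: R').head? := by
            intro hc
            exact h2 ⟨by simp, by simpa [leOpt] using hc⟩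
          simp [leOpt] at hnm
          intro x hx
          rcases List.mem_cons.mp hx with rfl | hx'
          · omega
          · have := (List.pairwise_cons.mp hM).1 x hx'
            omega
      have hr0L : ∀ x ∈ L, r0 ≤ x := by
        cases L with
        | nil => intro x hx; simp at hx
        | cons a L' =>
          have hcase : ¬(leOpt a M.head? ∧ leOpt a (r0 :: R').head?) := by
            intro hc
            exact h1 ⟨by simp, by simpa [leOpt] using hc.1, by simpa [leOpt] using hc.2⟩
          have ha : r0 ≤ a := by
            by_cases hma : leOpt a M.head?
            · have hnr : ¬ leOpt a (r0 :: R').head? := fun hc => hcase ⟨hma, hc⟩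
              simp [leOpt] at hnr
              omega
            · cases M with
              | nil => exact absurd (Or.inl rfl) hma
              | cons m0 M' =>
                simp [leOpt] at hma
                have := hr0M m0 List.mem_cons_self
                omega
          intro x hx
          rcases List.mem_cons.mp hx with rfl | hx'
          · exact ha
          · exact le_trans ha (le_of_lt ((List.pairwise_cons.mp hL).1 x hx'))
      have hhead : ∀ x, (x ∈ L ∨ x ∈ M ∨ x ∈ R') → r0 ≤ x := by
        rintro x (hx | hx | hx)
        · exact hr0L x hx
        · exact hr0M x hx
        · exact le_of_lt ((List.pairwise_cons.mp hR).1 x hx)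
      have hle' : ∀ b ∈ pushDedup merged r0, ∀ x, (x ∈ L ∨ x ∈ M ∨ x ∈ R') → b ≤ x := by
        intro b hb x hx
        rcases (mem_pushDedup merged r0 b).mp hb with hb' | rfl
        · refine hle b hb' x ?_
          rcases hx with h | h | h
          · exact Or.inl h
          · exact Or.inr (Or.inl h)
          · exact Or.inr (Or.inr (List.mem_cons_of_mem _ h))
        · exact hhead x hx
      have hm' := pushDedup_pairwise hm
        (fun b hb => hle b hb r0 (Or.inr (Or.inr List.mem_cons_self)))
      have ih' := ih hm' hL hM hRtail hle'
      refine ⟨ih'.1, fun x => ?_⟩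
      rw [ih'.2 x, mem_pushDedup]
      simp only [List.mem_cons]
      tauto

-- characterization of A on a valid range: strictly increasing, members = values of arr[l..r]
lemma A_char (arr : List Int) (l r : Int) (h0 : 0 ≤ l) (hlr : l ≤ r) (hr : r < (arr.length : Int)) :
    (three_way_split arr l r).Pairwise (· < ·) ∧
      (∀ x, x ∈ three_way_split arr l r ↔
        ∃ i : Nat, l ≤ (i : Int) ∧ (i : Int) ≤ r ∧ arr[i]? = some x) := by
  by_cases hbase : l ≥ r
  · have heq : l = r := le_antisymm hlr hbase
    subst heq
    rw [three_way_split, dif_pos hbase, if_pos rfl]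
    have hget : PySem.List.pyGet? arr l = some arr[l.toNat] :=
      PySem.List.pyGet?_eq_some_getElem arr h0 (by omega)
    refine ⟨by simp, fun x => ?_⟩
    simp only [hget, Option.getD_some, List.mem_singleton]
    constructor
    · rintro rfl
      exact ⟨l.toNat, by omega, by omega, List.getElem?_eq_some_iff.mpr ⟨by omega, rfl⟩⟩
    · rintro ⟨i, h1, h2, h3⟩
      have hieq : i = l.toNat := by omega
      subst hieq
      obtain ⟨_, h4⟩ := List.getElem?_eq_some_iff.mp h3
      exact h4.symm
  · have hlt : l < r := lt_of_not_ge hbase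
    rw [three_way_split, dif_neg hbase]
    simp only [pyFloorDiv2, pyFloorDiv4, merge_sort]
    have hA := A_char arr l (l + (r - l + 1) / 2 - 1) h0 (by omega) (by omega)
    have hB := A_char arr (l + (r - l + 1) / 4)
      (l + (r - l + 1) / 4 + (r - l + 1) / 2 - 1) (by omega) (by omega) (by omega)
    have hC := A_char arr (l + (r - l + 1) / 2) r (by omega) (by omega) hr
    have hspec := pyMerge3_spec [] _ _ _ (by simp) hA.1 hB.1 hC.1 (by simp)
    refine ⟨hspec.1, fun x => ?_⟩
    rw [hspec.2 x]
    simp only [List.not_mem_nil, false_or]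
    rw [hA.2 x, hB.2 x, hC.2 x]
    constructor
    · rintro (⟨i, a, b, c⟩ | ⟨i, a, b, c⟩ | ⟨i, a, b, c⟩) <;> exact ⟨i, by omega, by omega, c⟩
    · rintro ⟨i, a, b, c⟩
      by_cases hsplit : (i : Int) ≤ l + (r - l + 1) / 2 - 1
      · exact Or.inl ⟨i, by omega, hsplit, c⟩
      · exact Or.inr (Or.inr ⟨i, by omega, by omega, c⟩)
termination_by (r - l).toNat
decreasing_by all_goals omega

lemma dedupAdj_cons (out : List Int) (x : Int) (t : List Int) :
    dedupAdj out (x :: t) = dedupAdj (pushDedup out x) t := by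
  conv_lhs => rw [dedupAdj]
  unfold pushDedup
  split_ifs <;> rfl

lemma dedupAdj_spec (s : List Int) : ∀ out : List Int, out.Pairwise (· < ·) →
    s.Pairwise (· ≤ ·) → (∀ a ∈ out, ∀ x ∈ s, a ≤ x) →
    (dedupAdj out s).Pairwise (· < ·) ∧ (∀ x, x ∈ dedupAdj out s ↔ x ∈ out ∨ x ∈ s) := by
  induction s with
  | nil =>
    intro out hout _ _
    exact ⟨hout, by simp [dedupAdj]⟩
  | cons x t ih =>
    intro out hout hs hle
    rw [dedupAdj_cons]
    have hle0 : ∀ a ∈ out, a ≤ x := fun a ha => hle a ha x List.mem_cons_self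
    have h1 := pushDedup_pairwise hout hle0
    have hts := (List.pairwise_cons.mp hs).2
    have hle' : ∀ a ∈ pushDedup out x, ∀ y ∈ t, a ≤ y := by
      intro a ha y hy
      rcases (mem_pushDedup out x a).mp ha with ha' | rfl
      · exact hle a ha' y (List.mem_cons_of_mem _ hy)
      · exact (List.pairwise_cons.mp hs).1 y hy
    have ih' := ih (pushDedup out x) h1 hts hle'
    refine ⟨ih'.1, fun y => ?_⟩
    rw [ih'.2 y, mem_pushDedup]
    simp only [List.mem_cons]
    tauto

-- characterization of B on a valid range, with the same membership formula
lemma B_char (arr : List Int) (l r : Int) (h0 : 0 ≤ l) (hlr : l ≤ r) (hr : r < (arr.length : Int)) :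
    (three_way_split_alt arr l r).Pairwise (· < ·) ∧
      (∀ x, x ∈ three_way_split_alt arr l r ↔
        ∃ i : Nat, l ≤ (i : Int) ∧ (i : Int) ≤ r ∧ arr[i]? = some x) := by
  rw [three_way_split_alt, if_neg (by omega)]
  have hsl : PySem.List.slice arr (some l) (some (r + 1)) =
      List.take ((r + 1).toNat - l.toNat) (List.drop l.toNat arr) :=
    PySem.List.slice_toNat arr h0 (by omega)
  have hsorted := PySem.List.sorted_pairwise (PySem.List.slice arr (some l) (some (r + 1))) (fun x => x)
  have hd := dedupAdj_spec (PySem.List.sorted (PySem.List.slice arr (some l) (some (r + 1))) (fun x => x) false)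
    [] (by simp) hsorted (by simp)
  refine ⟨hd.1, fun x => ?_⟩
  rw [hd.2 x]
  simp only [List.not_mem_nil, false_or, PySem.List.mem_sorted]
  rw [hsl]
  constructor
  · intro hx
    rcases List.mem_iff_getElem?.mp hx with ⟨j, hj⟩
    obtain ⟨hjlen, _⟩ := List.getElem?_eq_some_iff.mp hj
    rw [List.length_take, List.length_drop] at hjlen
    rw [List.getElem?_take, if_pos (by omega), List.getElem?_drop] at hj
    refine ⟨l.toNat + j, by omega, by omega, hj⟩
  · rintro ⟨i, h1, h2, h3⟩
    obtain ⟨hilen, _⟩ := List.getElem?_eq_some_iff.mp h3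
    refine List.mem_iff_getElem?.mpr ⟨i - l.toNat, ?_⟩
    rw [List.getElem?_take, if_pos (by omega), List.getElem?_drop]
    have : l.toNat + (i - l.toNat) = i := by omega
    rw [this]
    exact h3

-- ===== VERDICT (by name: the statement is the Claim_ definition above) =====
theorem three_way_split_spec : Claim_equal_three_way_split := by
  intro arr l r _hdom hpre
  unfold Spec_three_way_split
  rcases hpre with hlt | ⟨h0, hlr, hr⟩
  · rw [three_way_split, dif_pos (by omega : l ≥ r), if_neg (by omega : ¬ l = r),
      three_way_split_alt, if_pos hlt]
  · have hA := A_char arr l r h0 hlr hr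
    have hB := B_char arr l r h0 hlr hr
    exact strictSorted_ext _ _ hA.1 hB.1 (fun x => (hA.2 x).trans ((hB.2 x).symm))
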